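-- pv_equiv track=rewrite | github.com/tenhotoi/KristyVu | mergeIntervals.py | solve
-- ===== SOURCE A (Python) =====
-- def solve(matrix):
--    if not matrix:
--       return -1
--    first = set(matrix[0])
--    for row in matrix:
--       first &= set(row)
--       if not first:
--          return -1
--    return min(first)
-- ===== SOURCE B (Python) =====
-- def solve(matrix):
--     counts = {}
--     for row in matrix:
--         for x in dict.fromkeys(row):
--             counts[x] = counts.get(x, 0) + 1
--     common = [x for x, c in counts.items() if c == len(matrix)]
--     return min(common, default=-1)
-- ===== Notes on version B (the rewrite author's own statement) =====
-- stated objective: alternative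
-- what changed: Replaced A's running set-intersection with early exit by a count-table pass: a dict counts for each element how many rows contain it (deduping each row), then the keys whose count equals len(matrix) are filtered out and their min (default -1) is returned.
import Mathlib
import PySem

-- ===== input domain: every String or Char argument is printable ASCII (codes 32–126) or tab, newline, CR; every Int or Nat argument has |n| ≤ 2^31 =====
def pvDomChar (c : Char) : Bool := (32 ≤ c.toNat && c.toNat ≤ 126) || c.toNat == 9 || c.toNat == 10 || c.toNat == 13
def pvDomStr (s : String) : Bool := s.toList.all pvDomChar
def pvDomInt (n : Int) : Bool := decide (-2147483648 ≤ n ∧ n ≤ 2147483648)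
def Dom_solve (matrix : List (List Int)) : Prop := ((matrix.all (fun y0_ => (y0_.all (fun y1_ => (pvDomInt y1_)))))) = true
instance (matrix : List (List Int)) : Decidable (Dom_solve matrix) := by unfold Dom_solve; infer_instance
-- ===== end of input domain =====

-- B replaces A's running set-intersection-with-early-exit by a count-table pass
-- (how many rows contain each element), then filters keys with count = len(matrix)
-- and takes their min with default -1; objective: alternative decomposition.

-- ===== PORT A =====
-- loop 'for row in matrix' carrying the running intersection 'first'; after the loop, min(first)
-- (the 'none' branch of min? is unreachable: the loop returns -1 as soon as 'first' is empty)
def solveLoopA : List (List Int) → PySem.Set Int → Int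
  | [], first =>
      match PySem.List.min? first (fun x => x) with
      | some m => m
      | none => -1
  | row :: rest, first =>
      let first' := PySem.Set.inter first (PySem.Set.ofList row)
      if first' = [] then -1 else solveLoopA rest first'

def solve (matrix : List (List Int)) : Int :=
  match matrix with
  | [] => -1
  | m0 :: _ => solveLoopA matrix (PySem.Set.ofList m0)

-- ===== PORT B =====
-- counts[x] = counts.get(x, 0) + 1 over each row's dict.fromkeys (= PySem.List.dedup)
def solve_alt (matrix : List (List Int)) : Int :=
  let counts : PySem.Dict Int Int :=
    matrix.foldl
      (fun d row => (PySem.List.dedup row).foldl (fun d x => d.insert x (d.getD x 0 + 1)) d)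
      PySem.Dict.empty
  let common := (counts.items.filter (fun p => p.2 == (matrix.length : Int))).map (fun p => p.1)
  PySem.List.minD common (fun x => x) (-1)

-- ===== PRECONDITION & SPEC =====
def Spec_solve (matrix : List (List Int)) (out : Int) : Prop := out = solve_alt matrix
instance (matrix : List (List Int)) (out : Int) : Decidable (Spec_solve matrix out) := by unfold Spec_solve; infer_instance

-- ===== CLAIM (what is proved, stated in full; the proofs are below) =====
def Claim_equal_solve : Prop := ∀ (matrix : List (List Int)), Dom_solve matrix → Spec_solve matrix (solve matrix)

-- ===== LEMMAS AND PROOFS =====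

-- min? (no key) depends only on the membership set of the list
theorem min?_congr_mem (xs ys : List Int) (h : ∀ x, x ∈ xs ↔ x ∈ ys) :
    PySem.List.min? xs (fun x => x) = PySem.List.min? ys (fun x => x) := by
  cases hx : PySem.List.min? xs (fun x => x) with
  | none =>
      rw [PySem.List.min?_eq_none_iff] at hx
      subst hx
      rw [Eq.comm, PySem.List.min?_eq_none_iff]
      cases ys with
      | nil => rfl
      | cons y t => exact absurd ((h y).mpr (List.mem_cons_self)) (List.not_mem_nil)
  | some a =>
      cases hy : PySem.List.min? ys (fun x => x) with
      | none =>
          rw [PySem.List.min?_eq_none_iff] at hy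
          subst hy
          exact absurd ((h a).mp (PySem.List.min?_mem hx)) (List.not_mem_nil)
      | some b =>
          have hab : a ≤ b := PySem.List.min?_isMin hx b ((h b).mpr (PySem.List.min?_mem hy))
          have hba : b ≤ a := PySem.List.min?_isMin hy a ((h a).mp (PySem.List.min?_mem hx))
          exact congrArg some (le_antisymm hab hba)

-- A's loop computes min-or-(-1) of the elements of s that lie in every remaining row
theorem solveLoopA_char (rows : List (List Int)) (s : PySem.Set Int) :
    solveLoopA rows s =
      match PySem.List.min? (s.filter (fun x => rows.all (fun row => row.contains x))) (fun x => x) with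
      | some m => m
      | none => -1 := by
  induction rows generalizing s with
  | nil => simp [solveLoopA]
  | cons row rest ih =>
      have hinter : PySem.Set.inter s (PySem.Set.ofList row)
          = s.filter (fun x => row.contains x) := by
        show s.filter (fun x => (PySem.Set.ofList row).contains x) = _
        apply List.filter_congr
        intro x _
        simp [List.contains_eq_mem, PySem.Set.mem_ofList]
      have hchain : s.filter (fun x => (row :: rest).all (fun r => r.contains x))
          = (s.filter (fun x => row.contains x)).filter
              (fun x => rest.all (fun r => r.contains x)) := by
        rw [List.filter_filter]
        apply List.filter_congr
        intro x _
        simp [Bool.and_comm]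
      simp only [solveLoopA, hinter, hchain]
      split
      · next h => rw [h]; rfl
      · exact ih _

-- B's count table is the counter of the rows' deduplicated elements, flattened
theorem counts_eq_counter (matrix : List (List Int)) :
    matrix.foldl
      (fun d row => (PySem.List.dedup row).foldl (fun d x => d.insert x (d.getD x 0 + 1)) d)
      PySem.Dict.empty
    = PySem.Dict.counter (matrix.flatMap (fun row => PySem.List.dedup row)) := by
  rw [← PySem.Dict.foldl_insert_getD_add_one_eq_counter, List.foldl_flatMap]

-- how often x occurs in the flattened dedups = how many rows contain x
theorem count_flat_eq_countP (matrix : List (List Int)) (x : Int) :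
    (matrix.flatMap (fun row => PySem.List.dedup row)).count x
      = matrix.countP (fun row => decide (x ∈ row)) := by
  induction matrix with
  | nil => rfl
  | cons row rest ih =>
      rw [List.flatMap_cons, List.count_append, List.countP_cons, ih]
      have hd : (PySem.List.dedup row).count x = if x ∈ row then 1 else 0 := by
        by_cases hx : x ∈ row
        · rw [if_pos hx]
          exact List.count_eq_one_of_mem (PySem.List.nodup_dedup row)
            ((PySem.List.mem_dedup _ _).mpr hx)
        · rw [if_neg hx]
          exact List.count_eq_zero.mpr (fun hm => hx ((PySem.List.mem_dedup _ _).mp hm))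
      rw [hd]
      by_cases hx : x ∈ row <;> simp [hx, Nat.add_comm]

-- projecting back the keys: [x for x, c in items if c == n] over items built as (k, c k)
theorem map_fst_filter_snd (c : Int → Int) (n : Int) (l : List Int) :
    ((l.map (fun k => (k, c k))).filter (fun p => p.2 == n)).map (fun p => p.1)
      = l.filter (fun k => c k == n) := by
  induction l with
  | nil => rfl
  | cons y t ih => by_cases h : c y == n <;> simp [h, ih]

-- B's candidate list is a filter of the flattened-dedup set by its row-count
theorem solve_alt_char (matrix : List (List Int)) :
    solve_alt matrix =
      ((PySem.List.min?
        ((PySem.Set.ofList (matrix.flatMap (fun row => PySem.List.dedup row))).filter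
          (fun k => ((matrix.flatMap (fun row => PySem.List.dedup row)).count k : Int)
              == (matrix.length : Int)))
        (fun x => x)).getD (-1)) := by
  simp only [solve_alt, counts_eq_counter, PySem.Dict.items_counter, PySem.List.minD,
    map_fst_filter_snd]

theorem solve_eq (matrix : List (List Int)) : solve matrix = solve_alt matrix := by
  rw [solve_alt_char]
  cases matrix with
  | nil => rfl
  | cons m0 rest =>
      simp only [solve, solveLoopA_char]
      have hmem : ∀ x : Int,
          x ∈ (PySem.Set.ofList m0).filter
              (fun x => (m0 :: rest).all (fun row => row.contains x))
          ↔ x ∈ (PySem.Set.ofList ((m0 :: rest).flatMap (fun row => PySem.List.dedup row))).filter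
              (fun k => (((m0 :: rest).flatMap (fun row => PySem.List.dedup row)).count k : Int)
                  == ((m0 :: rest).length : Int)) := by
        intro x
        simp only [List.mem_filter, PySem.Set.mem_ofList, List.all_eq_true,
          List.contains_eq_mem, decide_eq_true_eq, beq_iff_eq, List.mem_flatMap,
          PySem.List.mem_dedup, count_flat_eq_countP, Nat.cast_inj]
        rw [List.countP_eq_length]
        constructor
        · rintro ⟨hx, hall⟩
          exact ⟨⟨m0, List.mem_cons_self, hx⟩, fun r hr => decide_eq_true (hall r hr)⟩
        · rintro ⟨⟨r, hr, hxr⟩, hall⟩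
          exact ⟨of_decide_eq_true (hall m0 List.mem_cons_self),
                 fun r hr => of_decide_eq_true (hall r hr)⟩
      rw [min?_congr_mem _ _ hmem]
      generalize PySem.List.min?
        ((PySem.Set.ofList ((m0 :: rest).flatMap (fun row => PySem.List.dedup row))).filter
          (fun k => (((m0 :: rest).flatMap (fun row => PySem.List.dedup row)).count k : Int)
              == ((m0 :: rest).length : Int))) (fun x => x) = r
      cases r <;> rfl

-- ===== VERDICT (by name: the statement is the Claim_ definition above) =====
theorem solve_spec : Claim_equal_solve := by
  intro matrix _
  unfold Spec_solve
  exact solve_eq matrix
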